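-- pv_equiv track=rewrite | github.com/hariharan-brucewayne220/earningslens-nova | backend/briefing/generator.py | _fallback_briefing
-- ===== SOURCE A (Python) =====
-- def _fallback_briefing(claims: list[dict]) -> str:
--     """
--     Produce a simple rule-based briefing when Nova is unavailable.
--     """
--     verdicts = [c.get("verdict", "UNVERIFIABLE") for c in claims]
--     total = len(verdicts)
--     verified = verdicts.count("VERIFIED")
--     flagged = verdicts.count("FLAGGED")
--     unverifiable = verdicts.count("UNVERIFIABLE")
--
--     flagged_claims = [c for c in claims if c.get("verdict") == "FLAGGED"]
--     top_flag = ""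
--     if flagged_claims:
--         fc = flagged_claims[0]
--         top_flag = (
--             f" The most significant flag: {fc.get('explanation', 'see report for details')}."
--         )
--
--     return (
--         f"Analysis complete. Of {total} claims reviewed, {verified} were verified "
--         f"against the filing. {flagged} claim{'s' if flagged != 1 else ''} "
--         f"{'were' if flagged != 1 else 'was'} flagged.{top_flag} "
--         f"{unverifiable} forward guidance or unverifiable claim"
--         f"{'s' if unverifiable != 1 else ''} could not be confirmed against current filings."
--     )
-- ===== SOURCE B (Python) =====
-- def _fallback_briefing(claims: list[dict]) -> str:
--     # Single aggregating pass: counters + first-flag explanation, instead of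
--     # four separate scans over the claims list.
--     total = 0
--     verified = 0
--     flagged = 0
--     unverifiable = 0
--     top_flag = ""
--     for c in claims:
--         total += 1
--         v = c.get("verdict", "UNVERIFIABLE")
--         if v == "VERIFIED":
--             verified += 1
--         elif v == "FLAGGED":
--             flagged += 1
--             if flagged == 1:
--                 top_flag = (
--                     f" The most significant flag: {c.get('explanation', 'see report for details')}."
--                 )
--         elif v == "UNVERIFIABLE":
--             unverifiable += 1
--     return (
--         f"Analysis complete. Of {total} claims reviewed, {verified} were verified "
--         f"against the filing. {flagged} claim{'s' if flagged != 1 else ''} "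
--         f"{'were' if flagged != 1 else 'was'} flagged.{top_flag} "
--         f"{unverifiable} forward guidance or unverifiable claim"
--         f"{'s' if unverifiable != 1 else ''} could not be confirmed against current filings."
--     )
-- ===== Notes on version B (the rewrite author's own statement) =====
-- stated objective: alternative
-- what changed: B replaces A's four separate linear scans (a verdicts list comprehension, three .count() calls and a filter for flagged claims) with one aggregating pass that maintains the four counters and captures the first flagged claim's explanation as it goes.
import Mathlib
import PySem

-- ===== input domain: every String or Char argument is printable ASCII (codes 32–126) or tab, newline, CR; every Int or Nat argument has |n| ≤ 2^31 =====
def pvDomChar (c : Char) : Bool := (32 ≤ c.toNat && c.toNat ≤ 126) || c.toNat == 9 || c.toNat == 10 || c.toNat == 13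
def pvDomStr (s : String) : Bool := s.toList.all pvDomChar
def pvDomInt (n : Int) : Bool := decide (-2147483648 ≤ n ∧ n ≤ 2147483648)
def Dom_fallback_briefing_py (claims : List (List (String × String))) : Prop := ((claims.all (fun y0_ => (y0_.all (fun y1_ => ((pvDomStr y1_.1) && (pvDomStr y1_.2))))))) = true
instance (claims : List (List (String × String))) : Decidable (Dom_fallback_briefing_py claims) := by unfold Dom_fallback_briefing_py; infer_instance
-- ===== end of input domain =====

-- B replaces A's four separate scans with one aggregating pass (same cost class; different decomposition).

-- ===== PORT A =====
def fallback_briefing_py (claims : List (List (String × String))) : String :=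
  let verdicts := claims.map (fun c => (PySem.Dict.mk c).getD "verdict" "UNVERIFIABLE")
  let total : Int := verdicts.length
  let verified : Int := verdicts.count "VERIFIED"
  let flagged : Int := verdicts.count "FLAGGED"
  let unverifiable : Int := verdicts.count "UNVERIFIABLE"
  let flagged_claims := claims.filter (fun c => (PySem.Dict.mk c).get? "verdict" == some "FLAGGED")
  let top_flag : String :=
    match flagged_claims with
    | [] => ""
    | fc :: _ => " The most significant flag: " ++ (PySem.Dict.mk fc).getD "explanation" "see report for details" ++ "."
  "Analysis complete. Of " ++ PySem.Int.toStr total ++ " claims reviewed, " ++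
  PySem.Int.toStr verified ++ " were verified against the filing. " ++
  PySem.Int.toStr flagged ++ " claim" ++ (if flagged ≠ 1 then "s" else "") ++ " " ++
  (if flagged ≠ 1 then "were" else "was") ++ " flagged." ++ top_flag ++ " " ++
  PySem.Int.toStr unverifiable ++ " forward guidance or unverifiable claim" ++
  (if unverifiable ≠ 1 then "s" else "") ++ " could not be confirmed against current filings."

-- ===== PORT B =====
-- the single aggregating loop of Source B (state: total, verified, flagged, unverifiable, top_flag)
def fbLoop : List (List (String × String)) → Int → Int → Int → Int → String → Int × Int × Int × Int × String
  | [], total, ve, fl, un, tf => (total, ve, fl, un, tf)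
  | c :: rest, total, ve, fl, un, tf =>
    let v := (PySem.Dict.mk c).getD "verdict" "UNVERIFIABLE"
    if v = "VERIFIED" then fbLoop rest (total + 1) (ve + 1) fl un tf
    else if v = "FLAGGED" then
      fbLoop rest (total + 1) ve (fl + 1) un
        (if fl + 1 = 1 then
          " The most significant flag: " ++ (PySem.Dict.mk c).getD "explanation" "see report for details" ++ "."
         else tf)
    else if v = "UNVERIFIABLE" then fbLoop rest (total + 1) ve fl (un + 1) tf
    else fbLoop rest (total + 1) ve fl un tf

def fallback_briefing_py_alt (claims : List (List (String × String))) : String :=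
  match fbLoop claims 0 0 0 0 "" with
  | (total, verified, flagged, unverifiable, top_flag) =>
    "Analysis complete. Of " ++ PySem.Int.toStr total ++ " claims reviewed, " ++
  PySem.Int.toStr verified ++ " were verified against the filing. " ++
  PySem.Int.toStr flagged ++ " claim" ++ (if flagged ≠ 1 then "s" else "") ++ " " ++
  (if flagged ≠ 1 then "were" else "was") ++ " flagged." ++ top_flag ++ " " ++
  PySem.Int.toStr unverifiable ++ " forward guidance or unverifiable claim" ++
  (if unverifiable ≠ 1 then "s" else "") ++ " could not be confirmed against current filings."

-- ===== PRECONDITION & SPEC =====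
def Spec_fallback_briefing_py (claims : List (List (String × String))) (out : String) : Prop := out = fallback_briefing_py_alt claims
instance (claims : List (List (String × String))) (out : String) : Decidable (Spec_fallback_briefing_py claims out) := by unfold Spec_fallback_briefing_py; infer_instance

-- ===== CLAIM (what is proved, stated in full; the proofs are below) =====
def Claim_equal_fallback_briefing_py : Prop := ∀ (claims : List (List (String × String))), Dom_fallback_briefing_py claims → Spec_fallback_briefing_py claims (fallback_briefing_py claims)

-- ===== LEMMAS AND PROOFS =====

-- the verdict of a claim, with Python's .get default
def fbVerdict (c : List (String × String)) : String :=
  (PySem.Dict.mk c).getD "verdict" "UNVERIFIABLE"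

def fbMsg (c : List (String × String)) : String :=
  " The most significant flag: " ++ (PySem.Dict.mk c).getD "explanation" "see report for details" ++ "."

-- A's filter predicate coincides with testing the defaulted verdict
theorem fbPred_eq (c : List (String × String)) :
    ((PySem.Dict.mk c).get? "verdict" == some "FLAGGED") = (fbVerdict c = "FLAGGED") := by
  unfold fbVerdict
  rw [PySem.Dict.getD_eq_get?_getD]
  cases h : (PySem.Dict.mk c).get? "verdict" with
  | none => simp
  | some v => simp

theorem fbVerdict_def (c : List (String × String)) :
    (PySem.Dict.mk c).getD "verdict" "UNVERIFIABLE" = fbVerdict c := rfl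

def fbTop (l : List (List (String × String))) (tf : String) : String :=
  match l.filter (fun c => (PySem.Dict.mk c).get? "verdict" == some "FLAGGED") with
  | [] => tf
  | fc :: _ => fbMsg fc

theorem fbLoop_eq (l : List (List (String × String))) :
    ∀ (t ve fl un : Int) (tf : String), 0 ≤ fl →
    fbLoop l t ve fl un tf =
      (t + l.length,
       ve + ((l.map fbVerdict).count "VERIFIED" : Int),
       fl + ((l.map fbVerdict).count "FLAGGED" : Int),
       un + ((l.map fbVerdict).count "UNVERIFIABLE" : Int),
       if fl = 0 then fbTop l tf else tf) := by
  induction l with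
  | nil => intro t ve fl un tf _; simp [fbLoop, fbTop]
  | cons c rest ih =>
    intro t ve fl un tf h0
    have hpred := fbPred_eq c
    simp only [fbLoop, fbTop, List.map_cons, List.filter_cons, List.count_cons, List.length_cons,
      fbVerdict_def]
    by_cases h1 : fbVerdict c = "VERIFIED"
    · rw [if_pos h1, ih _ _ _ _ _ h0]
      have h2 : fbVerdict c ≠ "FLAGGED" := by rw [h1]; decide
      have h3 : fbVerdict c ≠ "UNVERIFIABLE" := by rw [h1]; decide
      simp only [fbTop, hpred, h1, beq_iff_eq, Prod.mk.injEq]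
      refine ⟨by push_cast; ring, by push_cast; ring, by push_cast; ring, by push_cast; ring, rfl⟩
    · rw [if_neg h1]
      by_cases h2 : fbVerdict c = "FLAGGED"
      · rw [if_pos h2, ih _ _ _ _ _ (by omega)]
        have h3 : fbVerdict c ≠ "UNVERIFIABLE" := by rw [h2]; decide
        simp only [fbTop, hpred, h2, beq_iff_eq, Prod.mk.injEq]
        refine ⟨by push_cast; ring, by push_cast; ring, by push_cast; ring, by push_cast; ring, ?_⟩
        by_cases hfl : fl = 0
        · have : fl + 1 ≠ 0 := by omega
          simp [hfl, fbMsg]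
        · have hne1 : fl + 1 ≠ 1 := by omega
          have hne0 : fl + 1 ≠ 0 := by omega
          simp [hfl, hne1, hne0]
      · rw [if_neg h2]
        by_cases h3 : fbVerdict c = "UNVERIFIABLE"
        · rw [if_pos h3, ih _ _ _ _ _ h0]
          simp only [fbTop, hpred, h3, beq_iff_eq, Prod.mk.injEq]
          refine ⟨by push_cast; ring, by push_cast; ring, by push_cast; ring, by push_cast; ring, ?_⟩
          simp
        · rw [if_neg h3, ih _ _ _ _ _ h0]
          simp only [fbTop, hpred, beq_iff_eq, if_neg h1, if_neg h2, if_neg h3, Prod.mk.injEq]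
          refine ⟨by push_cast; ring, by push_cast; ring, by push_cast; ring, by push_cast; ring, trivial⟩

-- ===== VERDICT (by name: the statement is the Claim_ definition above) =====
theorem fallback_briefing_py_spec : Claim_equal_fallback_briefing_py := by
  intro claims _
  unfold Spec_fallback_briefing_py fallback_briefing_py fallback_briefing_py_alt
  rw [fbLoop_eq _ _ _ _ _ _ (le_refl 0)]
  simp only [zero_add, fbTop, fbMsg, fbVerdict_def]
  simp
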